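-- pv_equiv track=rewrite | github.com/richardtjornhammar/impetuous | src/impetuous/hierarchical.py | prune_lvl_pclist
-- ===== SOURCE A (Python) =====
-- def prune_lvl_pclist(asc:list) -> list :
--     cp = dict()
--     for n,p,c in asc :
--         if c in cp :
--             l = cp[c][1]
--             if n<l :
--                 cp[c]=[p,n]
--         else :
--             cp[c] = [p,n]
--
--     pc_pruned=list()
--     for item in cp.items():
--         pc_pruned.append([item[1][0],item[0]])
--     return ( pc_pruned )
-- ===== SOURCE B (Python) =====
-- def prune_lvl_pclist(asc: list) -> list:
--     # group-then-reduce: collect each child's (level, parent) pairs, then pick the min-level pair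
--     groups = dict()
--     for n, p, c in asc:
--         groups.setdefault(c, []).append((n, p))
--     out = []
--     for c, pairs in groups.items():
--         n, p = min(pairs, key=lambda t: t[0])
--         out.append([p, c])
--     return out
-- ===== Notes on version B (the rewrite author's own statement) =====
-- stated objective: alternative
-- what changed: A maintains a running minimum per child inside one dict-updating loop; B first builds a grouping dict child -> list of (level, parent) pairs, then in a separate pass reduces each group with min(key=level), emitting [parent, child] in first-appearance order.
import Mathlib
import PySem

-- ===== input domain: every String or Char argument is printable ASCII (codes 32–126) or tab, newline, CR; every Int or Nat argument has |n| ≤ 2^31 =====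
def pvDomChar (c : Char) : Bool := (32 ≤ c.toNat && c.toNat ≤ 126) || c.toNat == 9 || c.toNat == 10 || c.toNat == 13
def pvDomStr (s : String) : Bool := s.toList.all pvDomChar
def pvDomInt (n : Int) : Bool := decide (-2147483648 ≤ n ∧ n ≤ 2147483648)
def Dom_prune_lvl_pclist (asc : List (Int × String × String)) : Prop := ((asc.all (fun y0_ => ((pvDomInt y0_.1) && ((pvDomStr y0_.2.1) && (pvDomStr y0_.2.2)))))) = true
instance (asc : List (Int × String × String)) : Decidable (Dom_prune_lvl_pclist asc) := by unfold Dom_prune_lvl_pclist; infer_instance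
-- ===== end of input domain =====

-- ===== PORT A =====
-- B changes only the decomposition (grouping pass + separate min-reduction); same O(n) cost ("alternative").
-- step of A's loop: update the running-minimum dict at child t.2.2 with parent t.2.1 and level t.1
def pruneStepA (cp : PySem.Dict String (String × Int)) (t : Int × String × String) :
    PySem.Dict String (String × Int) :=
  match cp.get? t.2.2 with
  | some pr => if t.1 < pr.2 then cp.insert t.2.2 (t.2.1, t.1) else cp
  | none => cp.insert t.2.2 (t.2.1, t.1)

def prune_lvl_pclist (asc : List (Int × String × String)) : List (List String) :=
  let cp := asc.foldl pruneStepA PySem.Dict.empty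
  cp.items.map (fun item => [item.2.1, item.1])

-- ===== PORT B =====
-- min(pairs, key=lambda t: t[0]) over a nonempty list h :: t (strict <, so the FIRST minimal pair wins)
def minByLvl (h : Int × String) (t : List (Int × String)) : Int × String :=
  t.foldl (fun b x => if x.1 < b.1 then x else b) h

def prune_lvl_pclist_alt (asc : List (Int × String × String)) : List (List String) :=
  let groups := asc.foldl
    (fun g t => g.modify t.2.2 [] (fun x => x ++ [(t.1, t.2.1)])) PySem.Dict.empty
  groups.items.map (fun item =>
    match item.2 with
    | [] => []  -- unreachable: every group collected by the loop is nonempty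
    | h :: t => [(minByLvl h t).2, item.1])

-- ===== PRECONDITION & SPEC =====
def Spec_prune_lvl_pclist (asc : List (Int × String × String)) (out : List (List String)) : Prop := out = prune_lvl_pclist_alt asc
instance (asc : List (Int × String × String)) (out : List (List String)) : Decidable (Spec_prune_lvl_pclist asc out) := by unfold Spec_prune_lvl_pclist; infer_instance

-- ===== CLAIM (what is proved, stated in full; the proofs are below) =====
def Claim_equal_prune_lvl_pclist : Prop := ∀ (asc : List (Int × String × String)), Dom_prune_lvl_pclist asc → Spec_prune_lvl_pclist asc (prune_lvl_pclist asc)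

-- ===== LEMMAS AND PROOFS =====

-- the effect of A's step on a single child's entry
def pruneStepO (o : Option (String × Int)) (x : Int × String) : Option (String × Int) :=
  match o with
  | some pr => if x.1 < pr.2 then some (x.2, x.1) else some pr
  | none => some (x.2, x.1)

-- the (level, parent) pairs of child c, in encounter order
def lvlPairs (asc : List (Int × String × String)) (c : String) : List (Int × String) :=
  (asc.filter (fun t => t.2.2 == c)).map (fun t => (t.1, t.2.1))

lemma stepA_none (d : PySem.Dict String (String × Int)) (t : Int × String × String)
    (hg : d.get? t.2.2 = none) : pruneStepA d t = d.insert t.2.2 (t.2.1, t.1) := by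
  simp [pruneStepA, hg]

lemma stepA_some (d : PySem.Dict String (String × Int)) (t : Int × String × String)
    (pr : String × Int) (hg : d.get? t.2.2 = some pr) :
    pruneStepA d t = if t.1 < pr.2 then d.insert t.2.2 (t.2.1, t.1) else d := by
  simp [pruneStepA, hg]

lemma keysA (asc : List (Int × String × String)) (d : PySem.Dict String (String × Int)) :
    (asc.foldl pruneStepA d).keys = PySem.Set.update d.keys (asc.map (fun t => t.2.2)) := by
  induction asc generalizing d with
  | nil => simp [PySem.Set.update]
  | cons t rest ih =>
    simp only [List.foldl_cons, List.map_cons, PySem.Set.update_cons, ih]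
    congr 1
    cases hg : d.get? t.2.2 with
    | none =>
      rw [stepA_none d t hg,
        PySem.Dict.keys_insert_of_not_contains d _
          (by rw [PySem.Dict.contains_eq_isSome_get?, hg]; rfl),
        PySem.Set.add_of_not_mem
          (by rw [← PySem.Dict.get?_eq_none_iff_not_mem_keys]; exact hg)]
    | some pr =>
      have hc : d.contains t.2.2 = true := by
        rw [PySem.Dict.contains_eq_isSome_get?, hg]; rfl
      have hm : t.2.2 ∈ d.keys := by
        by_contra hnm
        rw [← PySem.Dict.get?_eq_none_iff_not_mem_keys] at hnm
        rw [hnm] at hg; cases hg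
      rw [stepA_some d t pr hg, PySem.Set.add_of_mem hm]
      split
      · exact PySem.Dict.keys_insert_of_contains d _ hc
      · rfl

lemma getA (asc : List (Int × String × String)) (d : PySem.Dict String (String × Int)) (c : String) :
    (asc.foldl pruneStepA d).get? c = (lvlPairs asc c).foldl pruneStepO (d.get? c) := by
  induction asc generalizing d with
  | nil => simp [lvlPairs]
  | cons t rest ih =>
    simp only [List.foldl_cons, ih]
    by_cases hc : t.2.2 = c
    · subst hc
      have h1 : lvlPairs (t :: rest) t.2.2 = (t.1, t.2.1) :: lvlPairs rest t.2.2 := by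
        simp [lvlPairs]
      rw [h1, List.foldl_cons]
      congr 1
      cases hg : d.get? t.2.2 with
      | none =>
        rw [stepA_none d t hg, PySem.Dict.get?_insert_self]
        simp [pruneStepO]
      | some pr =>
        rw [stepA_some d t pr hg]
        simp only [pruneStepO]
        split
        · rw [PySem.Dict.get?_insert_self]
        · exact hg
    · have h1 : lvlPairs (t :: rest) c = lvlPairs rest c := by
        simp [lvlPairs, hc]
      rw [h1]
      congr 1
      cases hg : d.get? t.2.2 with
      | none => rw [stepA_none d t hg]; exact PySem.Dict.get?_insert_of_ne d _ (fun h => hc h.symm)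
      | some pr =>
        rw [stepA_some d t pr hg]
        split
        · exact PySem.Dict.get?_insert_of_ne d _ (fun h => hc h.symm)
        · rfl

lemma getB (asc : List (Int × String × String)) (c : String) :
    (asc.foldl (fun g t => g.modify t.2.2 [] (fun x => x ++ [(t.1, t.2.1)]))
        (PySem.Dict.empty : PySem.Dict String (List (Int × String)))).getD c []
      = lvlPairs asc c := by
  have h := PySem.Dict.getD_foldl_modify_append
    (asc.map (fun t => (t.2.2, (t.1, t.2.1))))
    (PySem.Dict.empty : PySem.Dict String (List (Int × String))) c
  rw [List.foldl_map] at h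
  simp only [h, PySem.Dict.getD_empty, List.nil_append, List.filter_map, lvlPairs,
    List.map_map]
  rfl

-- running the option-step over a group from its head computes the first-minimal pair
lemma minFold (t : List (Int × String)) (b : Int × String) :
    t.foldl pruneStepO (some (b.2, b.1)) =
      some ((minByLvl b t).2, (minByLvl b t).1) := by
  induction t generalizing b with
  | nil => rfl
  | cons x rest ih =>
    have hstep : pruneStepO (some (b.2, b.1)) x
        = some ((if x.1 < b.1 then x else b).2, (if x.1 < b.1 then x else b).1) := by
      by_cases h : x.1 < b.1 <;> simp [pruneStepO, h]
    have hm : minByLvl b (x :: rest) = minByLvl (if x.1 < b.1 then x else b) rest := by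
      unfold minByLvl; rw [List.foldl_cons]
    rw [List.foldl_cons, hstep, hm]
    exact ih _

lemma keysB (asc : List (Int × String × String)) :
    (asc.foldl (fun g t => g.modify t.2.2 [] (fun x => x ++ [(t.1, t.2.1)]))
        (PySem.Dict.empty : PySem.Dict String (List (Int × String)))).keys
      = PySem.Set.ofList (asc.map (fun t => t.2.2)) := by
  rw [PySem.Dict.keys_foldl_modify_key asc (fun t => t.2.2) []
    (fun _ t => fun x => x ++ [(t.1, t.2.1)])]
  simp [PySem.Set.update_nil_left]

-- ===== VERDICT (by name: the statement is the Claim_ definition above) =====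
theorem prune_lvl_pclist_spec : Claim_equal_prune_lvl_pclist := by
  intro asc _
  unfold Spec_prune_lvl_pclist
  simp only [prune_lvl_pclist, prune_lvl_pclist_alt]
  have hKA : (asc.foldl pruneStepA PySem.Dict.empty).keys
      = PySem.Set.ofList (asc.map (fun t => t.2.2)) := by
    rw [keysA]; simp [PySem.Set.update_nil_left]
  have hKB := keysB asc
  have hndA : (asc.foldl pruneStepA PySem.Dict.empty).keys.Nodup := by
    rw [hKA]; exact PySem.Set.nodup_ofList _
  have hndB : ((asc.foldl (fun g t => g.modify t.2.2 [] (fun x => x ++ [(t.1, t.2.1)]))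
      (PySem.Dict.empty : PySem.Dict String (List (Int × String))))).keys.Nodup := by
    rw [hKB]; exact PySem.Set.nodup_ofList _
  rw [PySem.Dict.items_eq_map_keys _ hndA ("", 0),
      PySem.Dict.items_eq_map_keys _ hndB [],
      hKA, hKB, List.map_map, List.map_map]
  apply List.map_congr_left
  intro c hcmem
  have hex : ∃ t ∈ asc, t.2.2 = c := by
    have := (PySem.Set.mem_ofList _ c).mp hcmem
    simpa using this
  have hne : lvlPairs asc c ≠ [] := by
    obtain ⟨t, ht, hc⟩ := hex
    unfold lvlPairs
    simp only [ne_eq, List.map_eq_nil_iff, List.filter_eq_nil_iff]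
    push Not
    exact ⟨t, ht, by simp [hc]⟩
  obtain ⟨h, tl, hhtl⟩ := List.exists_cons_of_ne_nil hne
  have hgB : (asc.foldl (fun g t => g.modify t.2.2 [] (fun x => x ++ [(t.1, t.2.1)]))
      (PySem.Dict.empty : PySem.Dict String (List (Int × String)))).getD c [] = h :: tl := by
    rw [getB, hhtl]
  have hgA : (asc.foldl pruneStepA PySem.Dict.empty).get? c
      = some ((minByLvl h tl).2, (minByLvl h tl).1) := by
    rw [getA, PySem.Dict.get?_empty, hhtl, List.foldl_cons]
    have hh : pruneStepO none h = some (h.2, h.1) := rfl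
    rw [hh, minFold]
  simp only [Function.comp, hgB, PySem.Dict.getD_eq_get?_getD, hgA]
  rfl
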